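-- pv_equiv track=rewrite | github.com/hillerlab/TOGA | CESAR_wrapper.py | classify_predict_exons
-- ===== SOURCE A (Python) =====
-- def sort_blocks(blocks_num):
--     """Return block: index and index: block dicts."""
--     block_to_index, index_to_block = {}, {}
--     pointer = -1
--     for i in range(blocks_num):
--         if i % 2 == 0:
--             # if so, it is a real block
--             pointer += 1
--             block_id = str(pointer)
--         else:  # otherwise an interblock range
--             block_id = f"{pointer}_{pointer + 1}"
--         block_to_index[block_id] = i
--         index_to_block[i] = block_id
--     return block_to_index, index_to_block
--
-- def classify_predict_exons(exon_blocks, block_coordinates, margin_cases):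
--     """Classify exons and get expected coordinates."""
--     exon_class, exon_exp_q_region = {}, {}
--     block_deleted = {}
--     block_to_index, index_to_block = sort_blocks(len(block_coordinates))
--     # for each block compute if it corresponds to gap in query
--     for block_num, block_coords in block_coordinates.items():
--         block_deleted[block_num] = True if block_coords[2] == block_coords[3] else False
--
--     for exon_num, blocks in exon_blocks.items():
--         # extract expected query region
--         block_indexes = sorted([block_to_index.get(b) for b in blocks])
--         start_block_id = index_to_block.get(block_indexes[0])
--         end_block_id = index_to_block.get(block_indexes[-1])
--         start_block_coords = block_coordinates.get(start_block_id)
--         end_block_coords = block_coordinates.get(end_block_id)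
--         exp_q_region_start = min(start_block_coords[2], end_block_coords[2])
--         exp_q_region_end = max(start_block_coords[3], end_block_coords[3])
--         exon_exp_q_region[exon_num] = (exp_q_region_start, exp_q_region_end)
--         margin_exon = margin_cases.get(exon_num)
--
--         # assign the class
--         if margin_exon:
--             # in case of margin exon the following happens:
--             #      exonexonexon
--             #          chainchainchain===chainchain
--             # so exon is not covered by the chain partly
--             this_exon_class = "M"
--         elif "_" not in start_block_id and "_" not in end_block_id:
--             # both start and end of the exon are covered, class A
--             # ----------exonexonexon----------
--             # ---chainchain====chaincha=======
--             # ==========chainchainchain-------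
--             this_exon_class = "A"
--         # >ENST00000464162 | 1 | 4482 | KK498653:40658904-40658593 | 59.81 | OK | A |
--         # exp:40655721-40655810 | EXCL
--         elif start_block_id == end_block_id and "_" in start_block_id:
--             # exon unaligned or completely removed, class C
--             # ----------exonexonexon----------
--             # ================================
--             # --------------------------------
--             this_exon_class = "C"
--         else:
--             # exon is covered somehow
--             # ----------exonexonexon----------
--             # -------chainchain===============
--             # -------------chainch------------
--             this_exon_class = "B"
--         # three options
--         exon_class[exon_num] = this_exon_class
--         exon_exp_q_region[exon_num] = (exp_q_region_start, exp_q_region_end)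
--
--     return exon_class, exon_exp_q_region
-- ===== SOURCE B (Python) =====
-- def classify_predict_exons(exon_blocks, block_coordinates, margin_cases):
--     """Classify exons and get expected coordinates."""
--     n = len(block_coordinates)
--     exon_class, exon_exp_q_region = {}, {}
--     for exon_num, blocks in exon_blocks.items():
--         wanted = set(blocks)
--         # walk the chain left to right, keeping the first and last block of this exon;
--         # position i is block str(i//2) when even, the interblock gap "p_p+1" when odd
--         start_block_id = end_block_id = None
--         for i in range(n):
--             half = i // 2
--             bid = str(half) if i % 2 == 0 else f"{half}_{half + 1}"
--             if bid in wanted: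
--                 if start_block_id is None:
--                     start_block_id = bid
--                 end_block_id = bid
--         start_coords = block_coordinates[start_block_id]
--         end_coords = block_coordinates[end_block_id]
--         exon_exp_q_region[exon_num] = (
--             min(start_coords[2], end_coords[2]),
--             max(start_coords[3], end_coords[3]),
--         )
--         if margin_cases.get(exon_num):
--             cls = "M"
--         elif "_" not in start_block_id and "_" not in end_block_id:
--             cls = "A"
--         elif start_block_id == end_block_id:
--             cls = "C"
--         else:
--             cls = "B"
--         exon_class[exon_num] = cls
--     return exon_class, exon_exp_q_region
-- ===== Notes on version B (the rewrite author's own statement) =====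
-- stated objective: alternative
-- what changed: B inverts the traversal: instead of building the two sort_blocks index dictionaries and sorting each exon's block indices to pick endpoints, it puts each exon's blocks in a set and scans the chain positions 0..n-1 left to right (generating each position's id arithmetically), recording the first and last position whose id the exon contains; the dead block_deleted loop is dropped and the redundant '_' re-test in the C branch removed.
import Mathlib
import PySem

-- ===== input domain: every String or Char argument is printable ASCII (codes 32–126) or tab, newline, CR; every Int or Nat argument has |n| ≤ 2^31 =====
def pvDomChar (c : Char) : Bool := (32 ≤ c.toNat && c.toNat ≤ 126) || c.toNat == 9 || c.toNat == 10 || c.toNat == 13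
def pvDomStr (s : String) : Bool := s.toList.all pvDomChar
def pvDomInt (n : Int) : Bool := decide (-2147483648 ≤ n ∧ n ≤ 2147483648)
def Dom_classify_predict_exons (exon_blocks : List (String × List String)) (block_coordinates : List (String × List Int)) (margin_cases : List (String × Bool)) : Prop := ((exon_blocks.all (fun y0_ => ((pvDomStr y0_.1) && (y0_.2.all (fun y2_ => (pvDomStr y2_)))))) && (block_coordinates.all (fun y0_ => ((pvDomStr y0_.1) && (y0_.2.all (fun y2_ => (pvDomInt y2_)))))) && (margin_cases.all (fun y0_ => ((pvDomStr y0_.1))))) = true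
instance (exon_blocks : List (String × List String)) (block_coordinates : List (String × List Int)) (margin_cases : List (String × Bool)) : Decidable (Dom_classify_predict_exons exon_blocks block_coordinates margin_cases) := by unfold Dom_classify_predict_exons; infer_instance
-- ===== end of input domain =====

-- B replaces sort_blocks' index dictionaries and the per-exon sort by a left-to-right scan of the
-- chain positions tracking each exon's first and last block; return value only is compared
-- (neither version mutates its inputs).

-- ===== PORT A =====
-- one step of sort_blocks' loop: state = (block_to_index, index_to_block, pointer)
def pvSortBlocksStep (st : PySem.Dict String Int × PySem.Dict Int String × Int) (i : Int) :
    PySem.Dict String Int × PySem.Dict Int String × Int :=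
  if PySem.Int.mod i 2 == 0 then
    let pointer := st.2.2 + 1
    let block_id := PySem.Int.toStr pointer
    (st.1.insert block_id i, st.2.1.insert i block_id, pointer)
  else
    let block_id := PySem.Int.toStr st.2.2 ++ "_" ++ PySem.Int.toStr (st.2.2 + 1)
    (st.1.insert block_id i, st.2.1.insert i block_id, st.2.2)

def sort_blocks (blocks_num : Int) : PySem.Dict String Int × PySem.Dict Int String :=
  let st := (PySem.List.pyRange 0 blocks_num 1).foldl pvSortBlocksStep
    (PySem.Dict.empty, PySem.Dict.empty, -1)
  (st.1, st.2.1)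

-- the body of A's per-exon loop
def pvStepA (block_to_index : PySem.Dict String Int) (index_to_block : PySem.Dict Int String)
    (bcD : PySem.Dict String (List Int)) (mcD : PySem.Dict String Bool)
    (acc : PySem.Dict String String × PySem.Dict String (Int × Int)) (q : String × List String) :
    PySem.Dict String String × PySem.Dict String (Int × Int) :=
  let exon_num := q.1
  let blocks := q.2
  -- block_to_index.get(b): a missing b gives None and Python raises in sorted/below;
  -- totalized with 0 (excluded by Pre_)
  let block_indexes := PySem.List.sorted (blocks.map (fun b => block_to_index.getD b 0)) (fun x => x) false
  -- block_indexes[0] / [-1]: IndexError on empty blocks (excluded by Pre_)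
  let start_block_id := index_to_block.getD (PySem.List.pyGetD block_indexes 0 0) ""
  let end_block_id := index_to_block.getD (PySem.List.pyGetD block_indexes (-1) 0) ""
  -- block_coordinates.get(...): a missing key gives None and None[2] raises (excluded by Pre_)
  let start_block_coords := bcD.getD start_block_id []
  let end_block_coords := bcD.getD end_block_id []
  let exp_q_region_start := min (PySem.List.pyGetD start_block_coords 2 0) (PySem.List.pyGetD end_block_coords 2 0)
  let exp_q_region_end := max (PySem.List.pyGetD start_block_coords 3 0) (PySem.List.pyGetD end_block_coords 3 0)
  let acc1 := (acc.1, acc.2.insert exon_num (exp_q_region_start, exp_q_region_end))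
  let margin_exon := mcD.getD exon_num false   -- .get: None is falsy, the dict's values are Bool
  let this_exon_class :=
    if margin_exon then "M"
    else if !(PySem.Str.isIn "_" start_block_id) && !(PySem.Str.isIn "_" end_block_id) then "A"
    else if start_block_id == end_block_id && PySem.Str.isIn "_" start_block_id then "C"
    else "B"
  (acc1.1.insert exon_num this_exon_class,
   acc1.2.insert exon_num (exp_q_region_start, exp_q_region_end))

def classify_predict_exons (exon_blocks : List (String × List String)) (block_coordinates : List (String × List Int)) (margin_cases : List (String × Bool)) : (List (String × String)) × (List (String × Int × Int)) :=
  let ebD := PySem.Dict.ofList exon_blocks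
  let bcD := PySem.Dict.ofList block_coordinates
  let mcD := PySem.Dict.ofList margin_cases
  let sb := sort_blocks (bcD.size : Int)
  -- block_deleted: computed and never read (kept from A); coords[2]/[3] totalized by
  -- pyGetD (an IndexError in Python, excluded by Pre_)
  let _block_deleted := bcD.items.foldl
    (fun (d : PySem.Dict String Bool) p =>
      d.insert p.1 (PySem.List.pyGetD p.2 2 0 == PySem.List.pyGetD p.2 3 0))
    PySem.Dict.empty
  let res := ebD.items.foldl (pvStepA sb.1 sb.2 bcD mcD) (PySem.Dict.empty, PySem.Dict.empty)
  (res.1.items, res.2.items)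

-- ===== PORT B =====
-- the body of B's per-exon loop: scan chain positions 0..n-1 keeping first/last block of the exon
def pvStepB (n : Int) (bcD : PySem.Dict String (List Int)) (mcD : PySem.Dict String Bool)
    (acc : PySem.Dict String String × PySem.Dict String (Int × Int)) (q : String × List String) :
    PySem.Dict String String × PySem.Dict String (Int × Int) :=
  let wanted := PySem.Set.ofList q.2
  let se := (PySem.List.pyRange 0 n 1).foldl
    (fun (p : Option String × Option String) i =>
      let half := PySem.Int.floordiv i 2
      let bid := if PySem.Int.mod i 2 == 0 then PySem.Int.toStr half
                 else PySem.Int.toStr half ++ "_" ++ PySem.Int.toStr (half + 1)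
      if PySem.Set.contains wanted bid then
        ((if p.1 = none then some bid else p.1), some bid)
      else p) (none, none)
  -- a still-None start/end makes Python raise KeyError below; totalized with "" (excluded by Pre_)
  let start_block_id := se.1.getD ""
  let end_block_id := se.2.getD ""
  -- block_coordinates[...]: KeyError for a missing key (excluded by Pre_)
  let start_coords := bcD.getD start_block_id []
  let end_coords := bcD.getD end_block_id []
  let region := (min (PySem.List.pyGetD start_coords 2 0) (PySem.List.pyGetD end_coords 2 0),
                 max (PySem.List.pyGetD start_coords 3 0) (PySem.List.pyGetD end_coords 3 0))
  let cls :=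
    if mcD.getD q.1 false then "M"
    else if !(PySem.Str.isIn "_" start_block_id) && !(PySem.Str.isIn "_" end_block_id) then "A"
    else if start_block_id == end_block_id then "C"
    else "B"
  (acc.1.insert q.1 cls, acc.2.insert q.1 region)

def classify_predict_exons_alt (exon_blocks : List (String × List String)) (block_coordinates : List (String × List Int)) (margin_cases : List (String × Bool)) : (List (String × String)) × (List (String × Int × Int)) :=
  let ebD := PySem.Dict.ofList exon_blocks
  let bcD := PySem.Dict.ofList block_coordinates
  let mcD := PySem.Dict.ofList margin_cases
  let res := ebD.items.foldl (pvStepB (bcD.size : Int) bcD mcD) (PySem.Dict.empty, PySem.Dict.empty)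
  (res.1.items, res.2.items)

-- ===== PRECONDITION & SPEC =====
-- the block/interblock id of chain index i, and the id list for n indexes
def pvIdOf (i : Nat) : String :=
  if i % 2 == 0 then PySem.Int.toStr ((i / 2 : Nat) : Int)
  else PySem.Int.toStr ((i / 2 : Nat) : Int) ++ "_" ++ PySem.Int.toStr (((i / 2 : Nat) : Int) + 1)
def pvValidIds (n : Nat) : List String := (List.range n).map pvIdOf

-- Pre_ excludes exactly the inputs on which A raises: a coordinate list with fewer than 4 entries
-- (IndexError), an exon with no blocks (IndexError), and an exon block id that is not one of the
-- chain ids "0","0_1","1",… for len(block_coordinates) or has no coordinates (dict .get returns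
-- None and Python raises on sorting/indexing it).
def Pre_classify_predict_exons (exon_blocks : List (String × List String)) (block_coordinates : List (String × List Int)) (margin_cases : List (String × Bool)) : Prop :=
  (∀ p ∈ (PySem.Dict.ofList block_coordinates).items, 4 ≤ p.2.length) ∧
  (∀ q ∈ (PySem.Dict.ofList exon_blocks).items, q.2 ≠ [] ∧
    ∀ b ∈ q.2, b ∈ pvValidIds (PySem.Dict.ofList block_coordinates).size ∧
      (PySem.Dict.ofList block_coordinates).contains b = true)
instance (exon_blocks : List (String × List String)) (block_coordinates : List (String × List Int)) (margin_cases : List (String × Bool)) : Decidable (Pre_classify_predict_exons exon_blocks block_coordinates margin_cases) := by unfold Pre_classify_predict_exons; infer_instance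

def pvWitness_classify_predict_exons : (List (String × List String)) × (List (String × List Int)) × (List (String × Bool)) :=
  ([("1", ["0", "0_1"])], [("0", [0, 0, 5, 10]), ("0_1", [0, 0, 10, 10])], [("1", false)])

def Spec_classify_predict_exons (exon_blocks : List (String × List String)) (block_coordinates : List (String × List Int)) (margin_cases : List (String × Bool)) (out : (List (String × String)) × (List (String × Int × Int))) : Prop := out = classify_predict_exons_alt exon_blocks block_coordinates margin_cases
instance (exon_blocks : List (String × List String)) (block_coordinates : List (String × List Int)) (margin_cases : List (String × Bool)) (out : (List (String × String)) × (List (String × Int × Int))) : Decidable (Spec_classify_predict_exons exon_blocks block_coordinates margin_cases out) := by unfold Spec_classify_predict_exons; infer_instance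

-- ===== CLAIM (what is proved, stated in full; the proofs are below) =====
def Claim_equal_classify_predict_exons : Prop := ∀ (exon_blocks : List (String × List String)) (block_coordinates : List (String × List Int)) (margin_cases : List (String × Bool)), Dom_classify_predict_exons exon_blocks block_coordinates margin_cases → Pre_classify_predict_exons exon_blocks block_coordinates margin_cases → Spec_classify_predict_exons exon_blocks block_coordinates margin_cases (classify_predict_exons exon_blocks block_coordinates margin_cases)

-- ===== LEMMAS AND PROOFS =====

lemma pv_digitChar_inj {a b : Nat} (ha : a < 10) (hb : b < 10) (h : Nat.digitChar a = Nat.digitChar b) : a = b := by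
  interval_cases a <;> interval_cases b <;> first | rfl | (exact absurd h (by decide))

lemma pv_toDigits10_inj : ∀ (m n : Nat), Nat.toDigits 10 m = Nat.toDigits 10 n → m = n := by
  intro m
  induction m using Nat.strong_induction_on with
  | _ m ih =>
    intro n h
    rw [Nat.toDigits_eq_if (n := m) (by norm_num), Nat.toDigits_eq_if (n := n) (by norm_num)] at h
    by_cases hm : m < 10 <;> by_cases hn : n < 10
    · simp [hm, hn] at h
      exact pv_digitChar_inj hm hn h
    · exfalso
      simp [hm, hn] at h
      have hlen := congrArg List.length h
      simp at hlen
      have hp := Nat.length_toDigits_pos (b := 10) (n := n / 10)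
      rw [hlen] at hp; simp at hp
    · exfalso
      simp [hm, hn] at h
      have hlen := congrArg List.length h
      simp at hlen
      have hp := Nat.length_toDigits_pos (b := 10) (n := m / 10)
      rw [hlen] at hp; simp at hp
    · simp [hm, hn] at h
      have hdiv := ih (m / 10) (by omega) (n / 10) h.1
      have hmod : m % 10 = n % 10 := pv_digitChar_inj (Nat.mod_lt _ (by norm_num)) (Nat.mod_lt _ (by norm_num)) h.2
      omega

lemma pv_underscore_not_mem_toDigits (n : Nat) : '_' ∉ Nat.toDigits 10 n := by
  intro h
  have := Nat.isDigit_of_mem_toDigits (b := 10) (by norm_num) (le_refl 10) h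
  exact absurd this (by decide)

lemma pv_toChars_natCast (k : Nat) : PySem.Int.toChars (k : Int) = Nat.toDigits 10 k := by
  simp [PySem.Int.toChars]

lemma pv_toList_toStr_natCast (k : Nat) : (PySem.Int.toStr (k : Int)).toList = Nat.toDigits 10 k := by
  rw [PySem.Int.toList_toStr, pv_toChars_natCast]

lemma pv_sep_inj : ∀ (a a' : List Char) {b b' : List Char}, '_' ∉ a → '_' ∉ a' →
    a ++ '_' :: b = a' ++ '_' :: b' → a = a' ∧ b = b' := by
  intro a
  induction a with
  | nil =>
    intro a' b b' _ ha' h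
    cases a' with
    | nil => simpa using h
    | cons y t' =>
      simp at h
      exact absurd (h.1 ▸ List.mem_cons_self ..) ha'
  | cons x t ih =>
    intro a' b b' ha ha' h
    cases a' with
    | nil =>
      simp at h
      exact absurd (h.1 ▸ List.mem_cons_self ..) ha
    | cons y t' =>
      simp at h
      simp at ha ha'
      have := ih t' (fun hm => ha.2 hm) (fun hm => ha'.2 hm) h.2
      exact ⟨by rw [h.1, this.1], this.2⟩

lemma pv_toList_idOf_even {i : Nat} (hi : i % 2 = 0) :
    (pvIdOf i).toList = Nat.toDigits 10 (i / 2) := by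
  simp only [pvIdOf, hi, beq_self_eq_true, if_true, pv_toList_toStr_natCast]

lemma pv_toList_idOf_odd {i : Nat} (hi : i % 2 ≠ 0) :
    (pvIdOf i).toList = Nat.toDigits 10 (i / 2) ++ '_' :: Nat.toDigits 10 (i / 2 + 1) := by
  have h1 : (((i / 2 : Nat) : Int) + 1) = ((i / 2 + 1 : Nat) : Int) := by push_cast; ring
  simp only [pvIdOf, hi, beq_iff_eq, if_false, String.toList_append, pv_toList_toStr_natCast,
    h1, show ("_" : String).toList = ['_'] from rfl]
  simp

lemma pvIdOf_inj : Function.Injective pvIdOf := by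
  intro i j h
  have hl := congrArg String.toList h
  by_cases hi : i % 2 = 0 <;> by_cases hj : j % 2 = 0
  · rw [pv_toList_idOf_even hi, pv_toList_idOf_even hj] at hl
    have := pv_toDigits10_inj _ _ hl
    omega
  · rw [pv_toList_idOf_even hi, pv_toList_idOf_odd hj] at hl
    exact absurd (hl ▸ List.mem_append_right _ (List.mem_cons_self ..))
      (pv_underscore_not_mem_toDigits _)
  · rw [pv_toList_idOf_odd hi, pv_toList_idOf_even hj] at hl
    exact absurd (hl.symm ▸ List.mem_append_right _ (List.mem_cons_self ..))
      (pv_underscore_not_mem_toDigits _)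
  · rw [pv_toList_idOf_odd hi, pv_toList_idOf_odd hj] at hl
    have := pv_sep_inj _ _ (pv_underscore_not_mem_toDigits _) (pv_underscore_not_mem_toDigits _) hl
    have := pv_toDigits10_inj _ _ this.1
    omega

lemma pv_index_validIds {n i : Nat} (h : i < n) :
    PySem.List.index? (pvValidIds n) (pvIdOf i) = some i := by
  rw [PySem.List.index?_eq_some_iff]
  refine ⟨(List.range i).map pvIdOf, (List.range (n - i - 1)).map (fun x => pvIdOf (i + (1 + x))), ?_, by simp, ?_⟩
  · rw [pvValidIds, show n = i + (1 + (n - i - 1)) by omega, List.range_add, List.range_add]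
    simp [List.map_map, Function.comp_def]
  · intro hmem
    simp at hmem
    obtain ⟨k, hk, he⟩ := hmem
    have := pvIdOf_inj he
    omega

lemma pv_mod2 (n : Nat) : PySem.Int.mod (n : Int) (2 : Int) = ((n % 2 : Nat) : Int) := by
  rw [PySem.Int.mod_eq_emod_of_pos (by omega)]; omega

lemma pv_fdiv2 (n : Nat) : PySem.Int.floordiv (n : Int) (2 : Int) = ((n / 2 : Nat) : Int) := by
  rw [PySem.Int.floordiv_eq_ediv_of_pos (by omega)]; omega

lemma pv_bid_eq (k : Nat) :
    (if PySem.Int.mod ((k : Int)) 2 == 0 then PySem.Int.toStr (PySem.Int.floordiv (k : Int) 2)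
     else PySem.Int.toStr (PySem.Int.floordiv (k : Int) 2) ++ "_" ++ PySem.Int.toStr (PySem.Int.floordiv (k : Int) 2 + 1))
    = pvIdOf k := by
  rw [pv_mod2 k, pv_fdiv2 k]
  by_cases hk : k % 2 = 0
  · simp only [pvIdOf, hk]
    norm_num
  · have h1 : ¬ (((k % 2 : Nat) : Int) == 0) = true := by simp; omega
    have h2 : ¬ ((k % 2) == 0) = true := by simp [hk]
    simp only [pvIdOf, h1, h2]

lemma pv_sb_fold (n : Nat) :
    ((PySem.List.pyRange 0 (n : Int) 1).foldl pvSortBlocksStep (PySem.Dict.empty, PySem.Dict.empty, -1)).2.2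
      = (((n + 1) / 2 : Nat) : Int) - 1
    ∧ ∀ i : Nat, i < n →
      ((PySem.List.pyRange 0 (n : Int) 1).foldl pvSortBlocksStep (PySem.Dict.empty, PySem.Dict.empty, -1)).1.get? (pvIdOf i) = some (i : Int)
      ∧ ((PySem.List.pyRange 0 (n : Int) 1).foldl pvSortBlocksStep (PySem.Dict.empty, PySem.Dict.empty, -1)).2.1.get? (i : Int) = some (pvIdOf i) := by
  induction n with
  | zero =>
    rw [show ((0 : Nat) : Int) = 0 from rfl, PySem.List.pyRange_one_eq_nil (by omega)]
    exact ⟨rfl, by omega⟩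
  | succ n ih =>
    have hrange : PySem.List.pyRange 0 ((n + 1 : Nat) : Int) 1
        = PySem.List.pyRange 0 (n : Int) 1 ++ [(n : Int)] := by
      push_cast
      exact PySem.List.pyRange_one_succ_right (by omega)
    rw [hrange, List.foldl_append]
    set st := (PySem.List.pyRange 0 (n : Int) 1).foldl pvSortBlocksStep (PySem.Dict.empty, PySem.Dict.empty, -1) with hst
    obtain ⟨hptr, hget⟩ := ih
    simp only [List.foldl_cons, List.foldl_nil]
    by_cases hn : n % 2 = 0
    · have hmod : (PySem.Int.mod (n : Int) 2 == 0) = true := by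
        rw [pv_mod2 n, hn]; rfl
      have hp : st.2.2 + 1 = ((n / 2 : Nat) : Int) := by rw [hptr]; omega
      have hid : PySem.Int.toStr (st.2.2 + 1) = pvIdOf n := by
        rw [hp, pvIdOf]; simp [hn]
      refine ⟨?_, ?_⟩
      · simp only [pvSortBlocksStep, hmod, if_true]
        rw [hp]; omega
      · intro i hi
        simp only [pvSortBlocksStep, hmod, if_true]
        rcases Nat.lt_succ_iff_lt_or_eq.mp hi with hi' | rfl
        · refine ⟨?_, ?_⟩
          · rw [hid, PySem.Dict.get?_insert_of_ne _ _ (by intro e; exact absurd (pvIdOf_inj e) (by omega))]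
            exact (hget i hi').1
          · rw [PySem.Dict.get?_insert_of_ne _ _ (by intro e; exact absurd e (by omega))]
            exact (hget i hi').2
        · exact ⟨by rw [hid, PySem.Dict.get?_insert_self], by rw [PySem.Dict.get?_insert_self, hid]⟩
    · have hmod : ¬ ((PySem.Int.mod (n : Int) 2 == 0) = true) := by
        rw [pv_mod2 n]
        simp; omega
      have hp : st.2.2 = ((n / 2 : Nat) : Int) := by rw [hptr]; omega
      have hid : PySem.Int.toStr st.2.2 ++ "_" ++ PySem.Int.toStr (st.2.2 + 1) = pvIdOf n := by
        rw [hp, pvIdOf]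
        have : ¬ (n % 2 == 0) = true := by simp [hn]
        simp [this]
      refine ⟨?_, ?_⟩
      · simp only [pvSortBlocksStep, hmod, Bool.false_eq_true, if_false]
        rw [hp]; omega
      · intro i hi
        simp only [pvSortBlocksStep, hmod, Bool.false_eq_true, if_false]
        rcases Nat.lt_succ_iff_lt_or_eq.mp hi with hi' | rfl
        · refine ⟨?_, ?_⟩
          · rw [hid, PySem.Dict.get?_insert_of_ne _ _ (by intro e; exact absurd (pvIdOf_inj e) (by omega))]
            exact (hget i hi').1
          · rw [PySem.Dict.get?_insert_of_ne _ _ (by intro e; exact absurd e (by omega))]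
            exact (hget i hi').2
        · exact ⟨by rw [hid, PySem.Dict.get?_insert_self], by rw [PySem.Dict.get?_insert_self, hid]⟩

lemma pv_pairwise_le_getLast : ∀ {l : List Int}, l.Pairwise (· ≤ ·) → ∀ (hne : l ≠ []),
    ∀ x ∈ l, x ≤ l.getLast hne := by
  intro l
  induction l with
  | nil => intro _ hne; exact absurd rfl hne
  | cons a t ih =>
    intro h hne x hx
    rcases List.pairwise_cons.mp h with ⟨ha, ht⟩
    cases t with
    | nil => simp at hx; simp [hx]
    | cons b t' =>
      rw [List.getLast_cons (by simp)]
      rcases List.mem_cons.mp hx with rfl | hx'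
      · exact le_trans (ha _ (List.getLast_mem _)) (le_refl _)
      · exact ih ht (by simp) x hx'

-- B's scan fold computes (first match, last match) of the generated ids
lemma pv_find?_append_singleton {α : Type} (pr : α → Bool) (a : α) :
    ∀ (l : List α), l.find? pr ≠ none → (l ++ [a]).find? pr = l.find? pr := by
  intro l
  induction l with
  | nil => intro h; exact absurd rfl h
  | cons x t ih =>
    intro h
    by_cases hx : pr x = true
    · simp [hx]
    · have hx' : pr x = false := by simpa using hx
      simp only [List.cons_append, List.find?_cons, hx'] at *
      exact ih h

lemma pv_find?_append_singleton_none {α : Type} (pr : α → Bool) (a : α) :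
    ∀ (l : List α), l.find? pr = none → (l ++ [a]).find? pr = if pr a then some a else none := by
  intro l
  induction l with
  | nil => intro _; cases h : pr a <;> simp [h]
  | cons x t ih =>
    intro h
    rcases List.find?_eq_none.mp h x (by simp) with hx
    have hx' : pr x = false := by simpa using hx
    simp only [List.cons_append, List.find?_cons, hx'] at *
    exact ih (by
      rw [List.find?_eq_none]
      intro y hy
      exact List.find?_eq_none.mp h y (by simp [hy]))

lemma pv_scan_fold (g : Nat → String) (pr : Nat → Bool) :
    ∀ (l : List Nat) (acc : Option String × Option String),
      l.foldl (fun p k => if pr k then ((if p.1 = none then some (g k) else p.1), some (g k)) else p) acc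
      = (acc.1.or ((l.find? pr).map g), ((l.reverse.find? pr).map g).or acc.2) := by
  intro l
  induction l with
  | nil => intro acc; simp
  | cons a t ih =>
    intro acc
    simp only [List.foldl_cons, ih, List.reverse_cons]
    by_cases ha : pr a = true
    · refine Prod.ext ?_ ?_
      · simp only [ha, if_true, List.find?_cons]
        cases hacc : acc.1 <;> simp [ha]
      · simp only [ha, if_true]
        cases hrev : t.reverse.find? pr with
        | some x => rw [pv_find?_append_singleton pr a _ (by rw [hrev]; simp), hrev]; simp
        | none => rw [pv_find?_append_singleton_none pr a _ hrev]; simp [ha]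
    · have ha' : pr a = false := by simpa using ha
      refine Prod.ext ?_ ?_
      · simp [ha', List.find?_cons]
      · cases hrev : t.reverse.find? pr with
        | some x => rw [pv_find?_append_singleton pr a _ (by rw [hrev]; simp), hrev]; simp
        | none => rw [pv_find?_append_singleton_none pr a _ hrev]; simp [ha']

-- in a strictly ordered list, find? returns the r-least true element
lemma pv_find?_first_of_pairwise {α : Type} {r : α → α → Prop} {pr : α → Bool} :
    ∀ {l : List α} {m : α}, l.Pairwise r → l.find? pr = some m →
      ∀ j ∈ l, pr j = true → r m j ∨ m = j := by
  intro l
  induction l with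
  | nil => intro m _ h; simp at h
  | cons a t ih =>
    intro m hp hf j hj hprj
    rcases List.pairwise_cons.mp hp with ⟨ha, ht⟩
    by_cases hpa : pr a = true
    · simp only [List.find?_cons, hpa] at hf
      have hma : a = m := by
        cases hf; rfl
      rcases List.mem_cons.mp hj with rfl | hj'
      · exact Or.inr hma.symm
      · left; exact hma ▸ ha j hj'
    · have hpa' : pr a = false := by simpa using hpa
      simp only [List.find?_cons, hpa'] at hf
      rcases List.mem_cons.mp hj with rfl | hj'
      · rw [hprj] at hpa'; cases hpa'
      · exact ih ht hf j hj' hprj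

-- equality of A's sorted-endpoints step and B's chain-scan step on valid blocks
lemma pv_class_eq (mb : Bool) (s e : String) :
    (if mb then "M"
     else if !(PySem.Str.isIn "_" s) && !(PySem.Str.isIn "_" e) then "A"
     else if s == e && PySem.Str.isIn "_" s then "C" else "B")
    = (if mb then "M"
       else if !(PySem.Str.isIn "_" s) && !(PySem.Str.isIn "_" e) then "A"
       else if s == e then "C" else "B") := by
  cases mb
  · by_cases hse : s = e
    · subst hse
      cases hu : PySem.Str.isIn "_" s <;> simp only [PySem.Str.isIn_eq] at hu <;> simp_all
    · have h : (s == e) = false := by simp [hse]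
      simp [h]
  · rfl

lemma pv_step_eq (n : Nat) (bcD : PySem.Dict String (List Int)) (mcD : PySem.Dict String Bool)
    (q : String × List String) (hq2 : q.2 ≠ []) (hbv : ∀ b ∈ q.2, b ∈ pvValidIds n)
    (acc : PySem.Dict String String × PySem.Dict String (Int × Int)) :
    pvStepA (sort_blocks (n : Int)).1 (sort_blocks (n : Int)).2 bcD mcD acc q
      = pvStepB (n : Int) bcD mcD acc q := by
  classical
  -- the index of a block, and the facts Pre_ gives about each block
  set idxN : String → Nat := fun b => ((PySem.List.index? (pvValidIds n) b).getD 0 : Nat) with hidxN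
  have hfacts : ∀ b ∈ q.2, idxN b < n ∧ b = pvIdOf (idxN b) ∧
      (sort_blocks (n : Int)).1.get? b = some ((idxN b : Nat) : Int) ∧
      (sort_blocks (n : Int)).2.get? ((idxN b : Nat) : Int) = some b := by
    intro b hbmem
    obtain ⟨i, hir, hbi⟩ := List.mem_map.mp (hbv b hbmem)
    have hi : i < n := List.mem_range.mp hir
    have hidx : idxN b = i := by rw [hidxN]; simp only []; rw [← hbi, pv_index_validIds hi]; rfl
    subst hbi
    rw [hidx]
    refine ⟨hi, rfl, ?_, ?_⟩
    · simpa [sort_blocks] using ((pv_sb_fold n).2 i hi).1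
    · simpa [sort_blocks] using ((pv_sb_fold n).2 i hi).2
  -- L : the (Int-valued) index list of the exon's blocks
  set L : List Int := q.2.map (fun b => ((idxN b : Nat) : Int)) with hL
  have hmemL : ∀ x ∈ L, ∃ b ∈ q.2, x = ((idxN b : Nat) : Int) ∧ ((idxN b : Nat) < n) := by
    intro x hx
    obtain ⟨b, hb, hbe⟩ := List.mem_map.mp hx
    exact ⟨b, hb, hbe.symm, (hfacts b hb).1⟩
  -- A side: the mapped index list is L
  have hmap : q.2.map (fun b => (sort_blocks (n : Int)).1.getD b 0) = L := by
    rw [hL]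
    apply List.map_congr_left
    intro b hbmem
    exact PySem.Dict.getD_of_get?_eq_some _ _ (hfacts b hbmem).2.2.1
  -- the sorted list is nonempty
  have hsne : PySem.List.sorted L (fun x => x) false ≠ [] := by
    rw [Ne, PySem.List.sorted_eq_nil_iff, hL]
    simp [hq2]
  obtain ⟨h0, t0, hcons⟩ := List.exists_cons_of_ne_nil hsne
  -- head of the sorted list: an element of L, minimal
  have hh0mem : h0 ∈ L := by
    have := (PySem.List.sorted_perm L (fun x => x) false).mem_iff (a := h0)
    rw [hcons] at this
    exact this.mp (List.mem_cons_self ..)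
  have hh0min : ∀ y ∈ L, h0 ≤ y := PySem.List.key_head_sorted_le L (fun x => x) hcons
  -- last of the sorted list: an element of L, maximal
  have hlast : PySem.List.pyGetD (PySem.List.sorted L (fun x => x) false) (-1) 0
      = (PySem.List.sorted L (fun x => x) false).getLast hsne :=
    PySem.List.pyGetD_neg_one _ _ hsne
  have hlmem : (PySem.List.sorted L (fun x => x) false).getLast hsne ∈ L :=
    ((PySem.List.sorted_perm L (fun x => x) false).mem_iff).mp (List.getLast_mem _)
  have hlmax : ∀ y ∈ L, y ≤ (PySem.List.sorted L (fun x => x) false).getLast hsne :=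
    fun y hy => pv_pairwise_le_getLast (PySem.List.sorted_pairwise L (fun x => x)) hsne y
      (((PySem.List.sorted_perm L (fun x => x) false).mem_iff).mpr hy)
  -- name A's two endpoint blocks
  obtain ⟨b0, hb0mem, hb0e, hb0lt⟩ := hmemL h0 hh0mem
  obtain ⟨b1, hb1mem, hb1e, hb1lt⟩ := hmemL _ hlmem
  have hb0get : (sort_blocks (n : Int)).2.getD h0 "" = b0 := by
    rw [hb0e]; exact PySem.Dict.getD_of_get?_eq_some _ _ (hfacts b0 hb0mem).2.2.2
  have hb1get : (sort_blocks (n : Int)).2.getD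
      ((PySem.List.sorted L (fun x => x) false).getLast hsne) "" = b1 := by
    rw [hb1e]; exact PySem.Dict.getD_of_get?_eq_some _ _ (hfacts b1 hb1mem).2.2.2
  -- B side: the scan predicate
  set pr : Nat → Bool := fun k => PySem.Set.contains (PySem.Set.ofList q.2) (pvIdOf k) with hpr
  have hprmem : ∀ k : Nat, pr k = true ↔ pvIdOf k ∈ q.2 := by
    intro k
    rw [hpr]
    simp [PySem.Set.contains, PySem.Set.mem_ofList]
  -- pr k ↔ (k : Int) ∈ L, for k < n
  have hprL : ∀ k : Nat, k < n → (pr k = true ↔ ((k : Nat) : Int) ∈ L) := by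
    intro k hk
    rw [hprmem]
    constructor
    · intro hmem
      rw [hL]
      exact List.mem_map.mpr ⟨pvIdOf k, hmem, by
        have : idxN (pvIdOf k) = k := by rw [hidxN]; simp only []; rw [pv_index_validIds hk]; rfl
        rw [this]⟩
    · intro hmem
      obtain ⟨b, hb, hbe, _⟩ := hmemL _ hmem
      have : idxN b = k := by exact_mod_cast hbe.symm
      have := (hfacts b hb).2.1
      rw [‹idxN b = k›] at this
      rwa [← this]
  -- B's fold over the chain positions
  have hfold : (PySem.List.pyRange 0 (n : Int) 1).foldl
      (fun (p : Option String × Option String) i =>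
        let half := PySem.Int.floordiv i 2
        let bid := if PySem.Int.mod i 2 == 0 then PySem.Int.toStr half
                   else PySem.Int.toStr half ++ "_" ++ PySem.Int.toStr (half + 1)
        if PySem.Set.contains (PySem.Set.ofList q.2) bid then
          ((if p.1 = none then some bid else p.1), some bid)
        else p) (none, none)
      = ((((List.range n).find? pr).map pvIdOf),
         (((List.range n).reverse.find? pr).map pvIdOf)) := by
    rw [PySem.List.pyRange_one]
    simp only [Int.sub_zero, Int.toNat_natCast]
    rw [List.foldl_map]
    have hbody : ∀ (p : Option String × Option String) (k : Nat),
        (fun (p : Option String × Option String) i =>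
          let half := PySem.Int.floordiv i 2
          let bid := if PySem.Int.mod i 2 == 0 then PySem.Int.toStr half
                     else PySem.Int.toStr half ++ "_" ++ PySem.Int.toStr (half + 1)
          if PySem.Set.contains (PySem.Set.ofList q.2) bid then
            ((if p.1 = none then some bid else p.1), some bid)
          else p) p ((0 : Int) + (k : Int))
        = (fun (p : Option String × Option String) k =>
            if pr k then ((if p.1 = none then some (pvIdOf k) else p.1), some (pvIdOf k)) else p) p k := by
      intro p k
      simp only [zero_add, pv_bid_eq k, hpr]
    rw [PySem.List.foldl_congr_mem _ _ _ _ (fun acc k hk => hbody acc k)]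
    rw [pv_scan_fold pvIdOf pr (List.range n) (none, none)]
    simp
  -- first match = index of A's start block, last match = index of A's end block
  have hfind1 : (List.range n).find? pr = some (idxN b0) := by
    cases hf : (List.range n).find? pr with
    | none =>
      exfalso
      have := List.find?_eq_none.mp hf (idxN b0) (List.mem_range.mpr hb0lt)
      rw [(hprL _ hb0lt).mpr (hb0e ▸ hh0mem)] at this
      simp at this
    | some m =>
      have hmmem : m ∈ List.range n := List.mem_of_find?_eq_some hf
      have hmlt : m < n := List.mem_range.mp hmmem
      have hprm : pr m = true := List.find?_some hf
      have hmin : m ≤ idxN b0 ∨ m = idxN b0 := by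
        have := pv_find?_first_of_pairwise List.pairwise_lt_range hf (idxN b0)
          (List.mem_range.mpr hb0lt) ((hprL _ hb0lt).mpr (hb0e ▸ hh0mem))
        omega
      have hge : idxN b0 ≤ m := by
        have hmL : ((m : Nat) : Int) ∈ L := (hprL m hmlt).mp hprm
        have := hh0min _ hmL
        rw [hb0e] at this
        exact_mod_cast this
      have : m = idxN b0 := by omega
      rw [this]
  have hfind2 : (List.range n).reverse.find? pr = some (idxN b1) := by
    cases hf : (List.range n).reverse.find? pr with
    | none =>
      exfalso
      have := List.find?_eq_none.mp hf (idxN b1) (by simp [List.mem_range, hb1lt])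
      rw [(hprL _ hb1lt).mpr (hb1e ▸ hlmem)] at this
      simp at this
    | some m =>
      have hmmem : m ∈ (List.range n).reverse := List.mem_of_find?_eq_some hf
      have hmlt : m < n := List.mem_range.mp (List.mem_reverse.mp hmmem)
      have hprm : pr m = true := List.find?_some hf
      have hrevp : ((List.range n).reverse).Pairwise (fun a b => b < a) :=
        List.pairwise_reverse.mpr (by simpa using List.pairwise_lt_range (n := n))
      have hmax : idxN b1 < m ∨ m = idxN b1 := by
        have := pv_find?_first_of_pairwise hrevp hf (idxN b1)
          (by simp [List.mem_range, hb1lt]) ((hprL _ hb1lt).mpr (hb1e ▸ hlmem))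
        omega
      have hle : m ≤ idxN b1 := by
        have hmL : ((m : Nat) : Int) ∈ L := (hprL m hmlt).mp hprm
        have := hlmax _ hmL
        rw [hb1e] at this
        exact_mod_cast this
      have : m = idxN b1 := by omega
      rw [this]
  -- assemble both steps
  have hS0 : PySem.List.pyGetD (PySem.List.sorted L (fun x => x) false) 0 0 = h0 := by
    rw [hcons]; exact PySem.List.pyGetD_zero_cons ..
  have hb0id : pvIdOf (idxN b0) = b0 := ((hfacts b0 hb0mem).2.1).symm
  have hb1id : pvIdOf (idxN b1) = b1 := ((hfacts b1 hb1mem).2.1).symm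
  simp only [pvStepA, pvStepB, hmap, hS0, hlast, hb0get, hb1get, hfold, hfind1, hfind2,
    Option.map_some, Option.getD_some, hb0id, hb1id]
  rw [pv_class_eq, PySem.Dict.insert_insert_self]

-- ===== VERDICT (by name: the statement is the Claim_ definition above) =====
theorem classify_predict_exons_spec : Claim_equal_classify_predict_exons := by
  intro exon_blocks block_coordinates margin_cases _ hpre
  obtain ⟨hbc4, hex⟩ := hpre
  show classify_predict_exons exon_blocks block_coordinates margin_cases
      = classify_predict_exons_alt exon_blocks block_coordinates margin_cases
  simp only [classify_predict_exons, classify_predict_exons_alt]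
  rw [PySem.List.foldl_congr_mem _ (pvStepA _ _ _ _) (pvStepB _ _ _) _
    (fun acc q hq => pv_step_eq (PySem.Dict.ofList block_coordinates).size _ _ q
      (hex q hq).1 (fun b hb => ((hex q hq).2 b hb).1) acc)]
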